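-- pv_equiv track=rewrite | github.com/mistasse/mozart-graal-benchmarking | benchmark.py | handle_pre_commands
-- ===== SOURCE A (Python) =====
-- def handle_pre_commands(list_, sep=","):
--     base = []
--     commands, current = [], None
--     for p in list_:
--         if p == sep:
--             current = []
--             commands.append(current)
--         elif current is None:
--             base.append(p)
--         else:
--             current.append(p)
--     return base, commands
-- ===== SOURCE B (Python) =====
-- def handle_pre_commands(list_, sep=","):
--     groups = []
--     rest = list_
--     while sep in rest:
--         i = rest.index(sep)
--         groups.append(rest[:i])
--         rest = rest[i + 1:]
--     groups.append(rest)
--     return groups[0], groups[1:]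
-- ===== Notes on version B (the rewrite author's own statement) =====
-- stated objective: alternative
-- what changed: B repeatedly cuts the list at the FIRST remaining separator (membership test + index + two slices on the unprocessed suffix) collecting whole groups at once, then takes base/commands as groups[0]/groups[1:], instead of A's element-by-element pass with a None-sentinel three-state accumulator.
import Mathlib
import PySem

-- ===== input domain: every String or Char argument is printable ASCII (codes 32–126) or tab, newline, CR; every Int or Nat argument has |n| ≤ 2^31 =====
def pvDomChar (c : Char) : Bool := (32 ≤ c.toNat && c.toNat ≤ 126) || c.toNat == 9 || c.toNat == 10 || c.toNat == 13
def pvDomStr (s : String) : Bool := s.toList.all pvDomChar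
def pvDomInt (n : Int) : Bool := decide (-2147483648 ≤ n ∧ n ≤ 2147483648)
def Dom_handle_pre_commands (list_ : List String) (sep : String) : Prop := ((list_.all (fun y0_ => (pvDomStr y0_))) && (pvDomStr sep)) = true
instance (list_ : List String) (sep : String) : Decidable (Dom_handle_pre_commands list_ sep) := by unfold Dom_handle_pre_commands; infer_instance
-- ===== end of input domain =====

-- B replaces A's None-sentinel three-state element loop by repeated cutting at the first remaining separator (membership + index + slices; base = groups[0], commands = groups[1:]); objective: alternative.


-- ===== PORT A =====
-- A's loop state: base, commands, and the optional live group `current`; Python's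
-- `current.append(p)` mutates the list aliased as the LAST element of commands, so the
-- port updates both (`commands.dropLast ++ [c ++ [p]]`) — exact model of the aliasing.
def hpcStepA (sep : String)
    (st : List String × List (List String) × Option (List String)) (p : String) :
    List String × List (List String) × Option (List String) :=
  let (base, commands, current) := st
  if p == sep then (base, commands ++ [[]], some [])
  else match current with
    | none => (base ++ [p], commands, none)
    | some c => (base, commands.dropLast ++ [c ++ [p]], some (c ++ [p]))

def handle_pre_commands (list_ : List String) (sep : String) :
    List String × List (List String) :=
  let st := list_.foldl (hpcStepA sep) ([], [], none)
  (st.1, st.2.1)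

-- ===== PORT B =====
-- the `while sep in rest` loop: `sep in rest` followed by `rest.index(sep)` is one
-- first-occurrence search, ported as a single match on PySem.List.index?
-- (some ↔ membership, and the index is the same); the slices rest[:i] / rest[i+1:]
-- are PySem.List.slice; the loop recurses on the strictly shorter suffix.
def hpcLoop (sep : String) (groups : List (List String)) (rest : List String) :
    List (List String) :=
  match h : PySem.List.index? rest sep with
  | some i =>
      hpcLoop sep (groups ++ [PySem.List.slice rest (some 0) (some (i : Int))])
        (PySem.List.slice rest (some ((i : Int) + 1)) none)
  | none => groups ++ [rest]
termination_by rest.length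
decreasing_by
  obtain ⟨hk, -, -⟩ := PySem.List.getElem_of_index?_eq_some h
  rw [PySem.List.slice_from rest (by positivity : (0:Int) ≤ (i : Int) + 1)]
  simp only [List.length_drop]
  omega

-- groups ends with an unconditional append, so it is never empty:
-- Python's groups[0] is its head, groups[1:] its tail.
def handle_pre_commands_alt (list_ : List String) (sep : String) :
    List String × List (List String) :=
  let groups := hpcLoop sep [] list_
  (groups.headD [], groups.tail)

-- ===== PRECONDITION & SPEC =====
def Spec_handle_pre_commands (list_ : List String) (sep : String) (out : List String × List (List String)) : Prop := out = handle_pre_commands_alt list_ sep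
instance (list_ : List String) (sep : String) (out : List String × List (List String)) : Decidable (Spec_handle_pre_commands list_ sep out) := by unfold Spec_handle_pre_commands; infer_instance

-- ===== CLAIM (what is proved, stated in full; the proofs are below) =====
def Claim_equal_handle_pre_commands : Prop := ∀ (list_ : List String) (sep : String), Dom_handle_pre_commands list_ sep → Spec_handle_pre_commands list_ sep (handle_pre_commands list_ sep)


-- ===== LEMMAS AND PROOFS =====

-- proof-only restatement of B's loop without the accumulator: the list of groups
-- produced from `rest` (same recursion, same slices)
def hpcSplit (sep : String) (items : List String) : List (List String) :=
  match h : PySem.List.index? items sep with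
  | some i =>
      [PySem.List.slice items (some 0) (some (i : Int))] ++
        hpcSplit sep (PySem.List.slice items (some ((i : Int) + 1)) none)
  | none => [items]
termination_by items.length
decreasing_by
  obtain ⟨hk, -, -⟩ := PySem.List.getElem_of_index?_eq_some h
  rw [PySem.List.slice_from items (by positivity : (0:Int) ≤ (i : Int) + 1)]
  simp only [List.length_drop]
  omega

-- unfolding equations for B's recursive split (its match binds the equation, so rw/simp
-- cannot rewrite the scrutinee directly; these two lemmas expose the two branches)
theorem hpcSplit_eq_none (sep : String) (l : List String)
    (h : PySem.List.index? l sep = none) : hpcSplit sep l = [l] := by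
  rw [hpcSplit]
  split
  · next i hi => rw [h] at hi; exact absurd hi (by simp)
  · rfl

theorem hpcSplit_eq_some (sep : String) (l : List String) (i : Nat)
    (h : PySem.List.index? l sep = some i) :
    hpcSplit sep l =
      [PySem.List.slice l (some (0:Int)) (some (i:Int))] ++
        hpcSplit sep (PySem.List.slice l (some ((i:Int)+1)) none) := by
  rw [hpcSplit]
  split
  · next j hj => rw [h] at hj; injection hj with hj; subst hj; rfl
  · next hn => rw [h] at hn; exact absurd hn (by simp)

-- unfolding equations (the matches bind their equation, so rw/simp cannot rewrite
-- the scrutinee directly; these lemmas expose the branches)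
theorem hpcLoop_eq_none (sep : String) (groups : List (List String)) (rest : List String)
    (h : PySem.List.index? rest sep = none) : hpcLoop sep groups rest = groups ++ [rest] := by
  rw [hpcLoop]
  split
  · next i hi => rw [h] at hi; exact absurd hi (by simp)
  · rfl

theorem hpcLoop_eq_some (sep : String) (groups : List (List String)) (rest : List String)
    (i : Nat) (h : PySem.List.index? rest sep = some i) :
    hpcLoop sep groups rest =
      hpcLoop sep (groups ++ [PySem.List.slice rest (some (0:Int)) (some (i:Int))])
        (PySem.List.slice rest (some ((i:Int)+1)) none) := by
  rw [hpcLoop]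
  split
  · next j hj => rw [h] at hj; injection hj with hj; subst hj; rfl
  · next hn => rw [h] at hn; exact absurd hn (by simp)

-- B's accumulator loop computes groups ++ hpcSplit sep rest
theorem hpcLoop_eq_append_split (sep : String) (rest : List String) :
    ∀ (groups : List (List String)), hpcLoop sep groups rest = groups ++ hpcSplit sep rest := by
  induction rest using hpcSplit.induct sep with
  | case1 items i h ih =>
      intro groups
      rw [hpcLoop_eq_some sep groups items i h, hpcSplit_eq_some sep items i h, ih,
          List.append_assoc]
  | case2 items h =>
      intro groups
      rw [hpcLoop_eq_none sep groups items h, hpcSplit_eq_none sep items h]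

theorem hpcSplit_ne_nil (sep : String) (items : List String) : hpcSplit sep items ≠ [] := by
  unfold hpcSplit
  split <;> simp

-- front-cons characterisation of B's recursive split
theorem hpcSplit_nil (sep : String) : hpcSplit sep [] = [[]] :=
  hpcSplit_eq_none sep [] (by rw [PySem.List.index?_eq_idxOf?]; rfl)

theorem hpcSplit_cons_self (sep : String) (l : List String) :
    hpcSplit sep (sep :: l) = [] :: hpcSplit sep l := by
  rw [hpcSplit_eq_some sep (sep :: l) 0 (PySem.List.index?_cons_self sep l)]
  have h1 : PySem.List.slice (sep :: l) (some (0:Int)) (some ((0:Nat):Int)) = [] := by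
    rw [show ((0:Nat):Int) = (0:Int) from rfl, show (0:Int) = ((0:Nat):Int) from rfl,
        PySem.List.slice_natCast]
    rfl
  have h2 : PySem.List.slice (sep :: l) (some (((0:Nat):Int) + 1)) none = l := by
    rw [show (((0:Nat):Int) + 1) = ((1:Nat):Int) by norm_num,
        PySem.List.slice_from_natCast]
    rfl
  rw [h1, h2]
  rfl

theorem hpcSplit_cons_ne (sep p : String) (l : List String) (hp : p ≠ sep) :
    hpcSplit sep (p :: l) =
      match hpcSplit sep l with
      | [] => [[p]]
      | g :: t => (p :: g) :: t := by
  have hidx := PySem.List.index?_cons_of_ne (x := p) (v := sep) l hp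
  cases hl : PySem.List.index? l sep with
  | none =>
      rw [hl] at hidx
      rw [hpcSplit_eq_none sep (p :: l) (by simpa using hidx),
          hpcSplit_eq_none sep l hl]
  | some i =>
      rw [hl] at hidx
      rw [hpcSplit_eq_some sep (p :: l) (i+1) (by simpa using hidx),
          hpcSplit_eq_some sep l i hl]
      have h1 : PySem.List.slice (p :: l) (some ((((i+1:Nat)):Int) + 1)) none
          = PySem.List.slice l (some (((i:Nat):Int) + 1)) none := by
        rw [show ((((i+1:Nat)):Int) + 1) = (((i+2:Nat)):Int) by push_cast; ring,
            show (((i:Nat):Int) + 1) = (((i+1:Nat)):Int) by push_cast; ring,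
            PySem.List.slice_from_natCast, PySem.List.slice_from_natCast]
        rfl
      have h2 : PySem.List.slice (p :: l) (some (0:Int)) (some (((i+1:Nat)):Int))
          = p :: PySem.List.slice l (some (0:Int)) (some ((i:Nat):Int)) := by
        rw [show (0:Int) = ((0:Nat):Int) from rfl,
            PySem.List.slice_natCast, PySem.List.slice_natCast]
        rfl
      rw [h1, h2]
      rfl

theorem hpcSplit_exists_cons (sep : String) (l : List String) :
    ∃ g t, hpcSplit sep l = g :: t := by
  cases hgs : hpcSplit sep l with
  | nil => exact absurd hgs (hpcSplit_ne_nil sep l)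
  | cons g t => exact ⟨g, t, rfl⟩

def hpcFinA (st : List String × List (List String) × Option (List String)) :
    List String × List (List String) := (st.1, st.2.1)

-- invariant while a group is live: A's commands = cs ++ [c] with c the live group;
-- the remaining input splits into g0 :: t, and the final commands are cs ++ (c ++ g0) :: t
theorem hpc_loop_some (sep : String) : ∀ (l : List String)
    (base : List String) (cs : List (List String)) (c : List String),
    hpcFinA (l.foldl (hpcStepA sep) (base, cs ++ [c], some c)) =
      (base, cs ++ (match hpcSplit sep l with
                    | [] => [c]
                    | g :: t => (c ++ g) :: t)) := by
  intro l
  induction l with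
  | nil =>
      intro base cs c
      simp [hpcFinA, hpcSplit_nil]
  | cons p l ih =>
      intro base cs c
      obtain ⟨g, t, hl⟩ := hpcSplit_exists_cons sep l
      by_cases hp : p = sep
      · rw [hp, List.foldl_cons]
        have h1 : hpcStepA sep (base, cs ++ [c], some c) sep
            = (base, (cs ++ [c]) ++ [[]], some []) := by
          simp [hpcStepA]
        rw [h1, ih base (cs ++ [c]) [], hpcSplit_cons_self, hl]
        simp
      · rw [List.foldl_cons]
        have h1 : hpcStepA sep (base, cs ++ [c], some c) p
            = (base, cs ++ [c ++ [p]], some (c ++ [p])) := by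
          simp [hpcStepA, hp]
        rw [h1, ih base cs (c ++ [p]), hpcSplit_cons_ne sep p l hp, hl]
        simp

-- invariant before the first separator: current = None, commands empty;
-- base absorbs the head group of the split of the remaining input
theorem hpc_loop_none (sep : String) : ∀ (l : List String) (base : List String),
    hpcFinA (l.foldl (hpcStepA sep) (base, [], none)) =
      (base ++ (hpcSplit sep l).headD [], (hpcSplit sep l).tail) := by
  intro l
  induction l with
  | nil => intro base; simp [hpcFinA, hpcSplit_nil]
  | cons p l ih =>
      intro base
      obtain ⟨g, t, hl⟩ := hpcSplit_exists_cons sep l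
      by_cases hp : p = sep
      · rw [hp, List.foldl_cons]
        have h1 : hpcStepA sep (base, [], none) sep = (base, [] ++ [[]], some []) := by
          simp [hpcStepA]
        rw [h1, hpc_loop_some sep l base [] [], hpcSplit_cons_self, hl]
        simp
      · rw [List.foldl_cons]
        have h1 : hpcStepA sep (base, [], none) p = (base ++ [p], [], none) := by
          simp [hpcStepA, hp]
        rw [h1, ih (base ++ [p]), hpcSplit_cons_ne sep p l hp, hl]
        simp

-- ===== VERDICT (by name: the statement is the Claim_ definition above) =====
theorem handle_pre_commands_spec : Claim_equal_handle_pre_commands := by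
  intro list_ sep _
  show handle_pre_commands list_ sep = handle_pre_commands_alt list_ sep
  have h1 := hpc_loop_none sep list_ []
  have h2 := hpcLoop_eq_append_split sep list_ []
  simpa [handle_pre_commands, handle_pre_commands_alt, hpcFinA, h2] using h1
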